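-- pv_equiv track=rewrite | github.com/jt-l/rna_seek | rna_seek.py | generate_diagonal_indicies
-- ===== SOURCE A (Python) =====
-- def generate_diagonal_indicies(d_matrix_size):
--     """ helper function to generate indicies to be used for traversing
--     d_matrix diagonally """
--
--     diagonal_indicies = []
--
--     # first generate the indicies for the diagonal below the half
--     # this means i is always greater than 1
--     j = 0
--     for i in range(1, d_matrix_size):
--         diagonal_indicies.append((i, j))
--         j += 1
--
--     # now generate the remainding indices
--     iterations = 0
--     while iterations <= 0:
--         for i in range(d_matrix_size):
--             diagonal = 0
--             for j in range(d_matrix_size):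
--                 if i+diagonal <= d_matrix_size - 1 and j <= d_matrix_size - 1:
--                     diagonal_indicies.append((j, i+diagonal))
--                     diagonal += 1
--
--         iterations += 1
--
--     return diagonal_indicies
-- ===== SOURCE B (Python) =====
-- def generate_diagonal_indicies(d_matrix_size):
--     """Collect every matrix cell (x, y) lying on a traversed diagonal (y >= x - 1)
--     in plain row-major order, then sort them into diagonal-traversal order by the
--     key (y - x) * n + x, which encodes (diagonal offset, column) lexicographically
--     since 0 <= x < n."""
--     n = d_matrix_size
--     cells = [(x, y) for y in range(n) for x in range(n) if y >= x - 1]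
--     return sorted(cells, key=lambda p: (p[1] - p[0]) * n + p[0])
-- ===== Notes on version B (the rewrite author's own statement) =====
-- stated objective: alternative
-- what changed: Instead of A's staged diagonal emission (separate sub-diagonal loop, dead while-wrapper, per-row diagonal counter), B collects the traversed cells (y >= x - 1) by a row-major comprehension and sorts them into diagonal order with the linear key (y - x) * n + x; it trades direct emission for generate-filter-sort.
import Mathlib
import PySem

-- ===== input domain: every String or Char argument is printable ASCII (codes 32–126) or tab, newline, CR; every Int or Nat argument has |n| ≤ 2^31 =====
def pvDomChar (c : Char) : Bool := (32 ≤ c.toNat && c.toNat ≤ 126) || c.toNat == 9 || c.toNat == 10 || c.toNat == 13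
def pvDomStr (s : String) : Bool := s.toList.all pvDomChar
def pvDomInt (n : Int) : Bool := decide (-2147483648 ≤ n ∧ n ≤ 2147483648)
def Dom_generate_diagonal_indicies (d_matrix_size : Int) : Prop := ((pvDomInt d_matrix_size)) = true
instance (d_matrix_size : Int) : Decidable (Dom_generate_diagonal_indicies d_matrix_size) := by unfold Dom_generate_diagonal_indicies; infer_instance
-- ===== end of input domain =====

-- B replaces A's staged diagonal emission (sub-diagonal loop, dead while-wrapper, per-row
-- diagonal counter) by a generate-filter-sort algorithm: collect the traversed cells in
-- row-major order and sort them by a linear diagonal key (alternative).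

-- ===== PORT A =====
-- the 'while iterations <= 0' loop of A: body once per iteration while the counter is ≤ 0
def pvWhileA (n : Int) (iterations : Int) (acc : List (Int × Int)) : List (Int × Int) :=
  if _h : iterations ≤ 0 then
    pvWhileA n (iterations + 1)
      ((PySem.List.pyRange 0 n 1).foldl (fun acc i =>
        ((PySem.List.pyRange 0 n 1).foldl
          (fun (s : Int × List (Int × Int)) j =>
            if i + s.1 ≤ n - 1 ∧ j ≤ n - 1 then (s.1 + 1, s.2 ++ [(j, i + s.1)]) else s)
          (0, acc)).2) acc)
  else acc
termination_by (1 - iterations).toNat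
decreasing_by omega

def generate_diagonal_indicies (d_matrix_size : Int) : List (Int × Int) :=
  let s := (PySem.List.pyRange 1 d_matrix_size 1).foldl
    (fun (s : Int × List (Int × Int)) i => (s.1 + 1, s.2 ++ [(i, s.1)])) (0, [])
  pvWhileA d_matrix_size 0 s.2

-- ===== PORT B =====
-- row-major comprehension over the cells with y >= x - 1, then a stable sort by the
-- key (y - x) * n + x (diagonal offset first, column second — lexicographic since 0 <= x < n)
def generate_diagonal_indicies_alt (d_matrix_size : Int) : List (Int × Int) :=
  let n := d_matrix_size
  let cells := (PySem.List.pyRange 0 n 1).foldl (fun acc y =>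
    (PySem.List.pyRange 0 n 1).foldl (fun acc x =>
      if x - 1 ≤ y then acc ++ [(x, y)] else acc) acc) []
  PySem.List.sorted cells (fun p => (p.2 - p.1) * n + p.1)

-- ===== PRECONDITION & SPEC =====
def Spec_generate_diagonal_indicies (d_matrix_size : Int) (out : List (Int × Int)) : Prop := out = generate_diagonal_indicies_alt d_matrix_size
instance (d_matrix_size : Int) (out : List (Int × Int)) : Decidable (Spec_generate_diagonal_indicies d_matrix_size out) := by unfold Spec_generate_diagonal_indicies; infer_instance

-- ===== CLAIM (what is proved, stated in full; the proofs are below) =====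
def Claim_equal_generate_diagonal_indicies : Prop := ∀ (d_matrix_size : Int), Dom_generate_diagonal_indicies d_matrix_size → Spec_generate_diagonal_indicies d_matrix_size (generate_diagonal_indicies d_matrix_size)

-- ===== LEMMAS AND PROOFS =====

-- the output in explicit diagonal order: offsets d = -1, 0, …, n-1, each contributing (j, j+d)
def pvD (n : Int) : List (Int × Int) :=
  (PySem.List.pyRange (-1) n 1).flatMap (fun d =>
    (PySem.List.pyRange (max 0 (-d)) (n - max d 0) 1).map (fun j => (j, j + d)))

-- B's row-major cell comprehension, as a flatMap of filtered rows
def pvCells (n : Int) : List (Int × Int) :=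
  (PySem.List.pyRange 0 n 1).flatMap (fun y =>
    ((PySem.List.pyRange 0 n 1).filter (fun x => decide (x - 1 ≤ y))).map (fun x => (x, y)))

-- A's first loop (counter j trailing i by one) equals the d = -1 diagonal loop
lemma pv_firstA (b : Int) : ∀ (a : Int) (acc : List (Int × Int)),
    ((PySem.List.pyRange a b 1).foldl
      (fun (s : Int × List (Int × Int)) i => (s.1 + 1, s.2 ++ [(i, s.1)])) (a - 1, acc)).2
    = (PySem.List.pyRange a b 1).foldl (fun acc j => acc ++ [(j, j + (-1))]) acc := by
  intro a
  by_cases h : b ≤ a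
  · simp [PySem.List.pyRange_one_eq_nil h]
  · intro acc
    rw [PySem.List.pyRange_one_cons (by omega)]
    simp only [List.foldl_cons]
    rw [show a + -1 = a - 1 by ring, show a - 1 + 1 = a + 1 - 1 by ring]
    exact pv_firstA b (a + 1) _
termination_by a => (b - a).toNat
decreasing_by omega

-- once the diagonal counter has run off the matrix, A's inner loop appends nothing more
lemma pv_deadA (n i d : Int) (h : ¬ i + d ≤ n - 1) : ∀ (l : List Int) (acc : List (Int × Int)),
    l.foldl (fun (s : Int × List (Int × Int)) j =>
        if i + s.1 ≤ n - 1 ∧ j ≤ n - 1 then (s.1 + 1, s.2 ++ [(j, i + s.1)]) else s) (d, acc)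
    = (d, acc) := by
  intro l
  induction l with
  | nil => intro acc; rfl
  | cons x xs ih =>
    intro acc
    simp only [List.foldl_cons]
    rw [if_neg (by tauto)]
    exact ih acc

-- A's inner loop at row-offset i (counter = current column while appending) equals the diagonal-i loop
lemma pv_innerA (n i : Int) (hi : 0 ≤ i) : ∀ (c : Int) (acc : List (Int × Int)),
    ((PySem.List.pyRange c n 1).foldl
      (fun (s : Int × List (Int × Int)) j =>
        if i + s.1 ≤ n - 1 ∧ j ≤ n - 1 then (s.1 + 1, s.2 ++ [(j, i + s.1)]) else s) (c, acc)).2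
    = (PySem.List.pyRange c (n - i) 1).foldl (fun acc j => acc ++ [(j, j + i)]) acc := by
  intro c
  by_cases h : n ≤ c
  · simp [PySem.List.pyRange_one_eq_nil h, PySem.List.pyRange_one_eq_nil (show n - i ≤ c by omega)]
  · intro acc
    rw [PySem.List.pyRange_one_cons (show c < n by omega)]
    simp only [List.foldl_cons]
    by_cases hc : i + c ≤ n - 1
    · rw [if_pos ⟨hc, by omega⟩]
      rw [pv_innerA n i hi (c + 1)]
      rw [PySem.List.pyRange_one_cons (show c < n - i by omega)]
      simp only [List.foldl_cons]
      rw [Int.add_comm i c]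
    · rw [if_neg (by tauto)]
      rw [pv_deadA n i c hc]
      simp [PySem.List.pyRange_one_eq_nil (show n - i ≤ c by omega)]
termination_by c => (n - c).toNat
decreasing_by omega

-- A's output, written as the diagonal-order nested fold
def pvFold (n : Int) : List (Int × Int) :=
  (PySem.List.pyRange (-1) n 1).foldl (fun acc d =>
    (PySem.List.pyRange (max 0 (-d)) (n - max d 0) 1).foldl
      (fun acc j => acc ++ [(j, j + d)]) acc) []

lemma pv_A_eq_fold (n : Int) : generate_diagonal_indicies n = pvFold n := by
  unfold generate_diagonal_indicies pvFold
  rw [pvWhileA, dif_pos (le_refl (0:Int)), pvWhileA, dif_neg (by omega : ¬ (0:Int) + 1 ≤ 0)]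
  by_cases hn : n ≤ -1
  · simp [PySem.List.pyRange_one_eq_nil (show n ≤ (0:Int) by omega),
      PySem.List.pyRange_one_eq_nil (show n ≤ (1:Int) by omega),
      PySem.List.pyRange_one_eq_nil (show n ≤ (-1:Int) by omega)]
  · rw [PySem.List.pyRange_one_cons (show (-1:Int) < n by omega)]
    simp only [List.foldl_cons]
    have hfirst := pv_firstA n 1 []
    simp only [show (1:ℤ) - 1 = 0 from by norm_num] at hfirst
    rw [show max (0:ℤ) (-(-1)) = 1 from by norm_num, show max (-1:ℤ) 0 = 0 from by norm_num,
      show n - 0 = n from by ring, ← hfirst]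
    apply PySem.List.foldl_congr_mem
    intro acc i hi
    rw [PySem.List.mem_pyRange_one] at hi
    rw [pv_innerA n i hi.1 0]
    have h1 : max 0 (-i) = 0 := by omega
    have h2 : max i 0 = i := by omega
    rw [h1, h2]

-- A's output is exactly the diagonal-order list pvD
lemma pv_A_eq_D (n : Int) : generate_diagonal_indicies n = pvD n := by
  rw [pv_A_eq_fold]
  unfold pvFold pvD
  simp only [PySem.List.foldl_append_singleton_eq_map]
  rw [PySem.List.foldl_append_eq_flatMap, List.nil_append]

-- membership in the diagonal-order list: exactly the cells with both indices in range and y ≥ x - 1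
lemma pv_mem_D (n : Int) (p : Int × Int) :
    p ∈ pvD n ↔ (0 ≤ p.1 ∧ p.1 < n ∧ 0 ≤ p.2 ∧ p.2 < n ∧ p.1 - 1 ≤ p.2) := by
  obtain ⟨x, y⟩ := p
  simp only [pvD, List.mem_flatMap, List.mem_map, PySem.List.mem_pyRange_one, Prod.mk.injEq]
  constructor
  · rintro ⟨d, ⟨hd1, hd2⟩, j, ⟨hj1, hj2⟩, rfl, rfl⟩
    omega
  · rintro ⟨hx0, hxn, hy0, hyn, hxy⟩
    exact ⟨y - x, by omega, x, by omega, rfl, by omega⟩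

-- membership in the row-major cell list: the same cells
lemma pv_mem_cells (n : Int) (p : Int × Int) :
    p ∈ pvCells n ↔ (0 ≤ p.1 ∧ p.1 < n ∧ 0 ≤ p.2 ∧ p.2 < n ∧ p.1 - 1 ≤ p.2) := by
  obtain ⟨x, y⟩ := p
  simp only [pvCells, List.mem_flatMap, List.mem_map, List.mem_filter,
    PySem.List.mem_pyRange_one, Prod.mk.injEq, decide_eq_true_eq]
  constructor
  · rintro ⟨y', ⟨hy1, hy2⟩, x', ⟨⟨hx1, hx2⟩, hf⟩, rfl, rfl⟩
    omega
  · rintro ⟨hx0, hxn, hy0, hyn, hxy⟩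
    exact ⟨y, ⟨hy0, hyn⟩, x, ⟨⟨hx0, hxn⟩, by omega⟩, rfl, rfl⟩

-- the diagonal-order list is strictly increasing under B's sort key
lemma pv_pairwise_D (n : Int) :
    (pvD n).Pairwise (fun a b => (a.2 - a.1) * n + a.1 < (b.2 - b.1) * n + b.1) := by
  unfold pvD
  rw [List.pairwise_flatMap]
  constructor
  · intro d _
    rw [List.pairwise_map]
    refine (PySem.List.pairwise_lt_pyRange_one _ _).imp ?_
    intro j j' h
    simp only [add_sub_cancel_left]
    omega
  · refine List.Pairwise.imp_of_mem ?_ (PySem.List.pairwise_lt_pyRange_one _ _)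
    intro d d' hd hd' hlt p hp q hq
    rw [PySem.List.mem_pyRange_one] at hd hd'
    simp only [List.mem_map, PySem.List.mem_pyRange_one] at hp hq
    obtain ⟨j, ⟨hj1, hj2⟩, rfl⟩ := hp
    obtain ⟨j', ⟨hj1', hj2'⟩, rfl⟩ := hq
    simp only [add_sub_cancel_left]
    have hjn : j < n := by omega
    have hn0 : 0 < n := by omega
    calc d * n + j < d * n + n := by omega
      _ = (d + 1) * n := by ring
      _ ≤ d' * n := by
          apply mul_le_mul_of_nonneg_right (by omega : d + 1 ≤ d') (by omega : (0:Int) ≤ n)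
      _ ≤ d' * n + j' := by omega

lemma pv_nodup_D (n : Int) : (pvD n).Nodup :=
  (pv_pairwise_D n).imp (fun h => by intro he; subst he; exact absurd h (lt_irrefl _))

lemma pv_nodup_cells (n : Int) : (pvCells n).Nodup := by
  unfold pvCells
  rw [List.nodup_flatMap]
  constructor
  · intro y _
    exact (((PySem.List.nodup_pyRange_one _ _).filter _).map
      (fun a b h => congrArg Prod.fst h))
  · refine List.Pairwise.imp ?_ (PySem.List.pairwise_lt_pyRange_one _ _)
    intro y y' hlt p hp hp'
    simp only [List.mem_map] at hp hp'
    obtain ⟨x, _, rfl⟩ := hp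
    obtain ⟨x', _, he⟩ := hp'
    have : y' = y := congrArg Prod.snd he
    omega

-- B equals the diagonal-order list: its cell list is a permutation of pvD, which pvD's
-- strict key order names as the sorted result
lemma pv_B_eq_D (n : Int) : generate_diagonal_indicies_alt n = pvD n := by
  unfold generate_diagonal_indicies_alt
  have hb : ∀ (y : Int) (acc : List (Int × Int)) (x : Int),
      (if x - 1 ≤ y then acc ++ [(x, y)] else acc)
      = (if decide (x - 1 ≤ y) = true then acc ++ [(x, y)] else acc) := by
    intro y acc x; simp
  simp only [hb]
  simp only [PySem.List.foldl_append_if, PySem.List.foldl_append_eq_flatMap, List.nil_append]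
  have hcells : (PySem.List.pyRange 0 n 1).flatMap (fun y =>
      ((PySem.List.pyRange 0 n 1).filter (fun x => decide (x - 1 ≤ y))).map (fun x => (x, y)))
      = pvCells n := rfl
  rw [hcells]
  apply PySem.List.sorted_eq_of_perm_of_pairwise_lt
  · exact (List.perm_ext_iff_of_nodup (pv_nodup_D n) (pv_nodup_cells n)).mpr
      (fun p => (pv_mem_D n p).trans (pv_mem_cells n p).symm)
  · exact pv_pairwise_D n

-- ===== VERDICT (by name: the statement is the Claim_ definition above) =====
theorem generate_diagonal_indicies_spec : Claim_equal_generate_diagonal_indicies := by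
  intro n _
  show generate_diagonal_indicies n = generate_diagonal_indicies_alt n
  rw [pv_A_eq_D, pv_B_eq_D]
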